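-- pv_equiv track=rewrite | github.com/xpqz/skalpel | apl/arr.py | coords
-- ===== SOURCE A (Python) =====
-- import math
-- from typing import Any, Callable, Generator, Optional, Sequence
--
-- def coords(shape: list[int]) -> Generator:
--     """
--     Generator. Step through the space defined by the shape, generating
--     each coordinate vector in turn.
--
--     >>> list(Array.coords([2, 3]))
--     [[0, 0], [0, 1], [0, 2], [1, 0], [1, 1], [1, 2]]
--     """
--     rnk = len(shape)
--     bound = math.prod(shape)
--     offsets = [0 for _ in range(rnk)]
--     coords = [0 for _ in range(rnk)]
--     yield coords[:]
--     for idx in range(1, bound):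
--         axis = rnk - 1
--         coords[axis] += 1
--         while axis>0 and coords[axis] == shape[axis] + offsets[axis]:
--             coords[axis] = 0
--             coords[axis-1] += 1
--             axis -= 1
--         yield coords[:]
-- ===== SOURCE B (Python) =====
-- import math
--
-- def coords(shape: list[int]):
--     """Yield each coordinate vector of the shape in row-major order,
--     reconstructing each one independently by mixed-radix decomposition."""
--     rnk = len(shape)
--     bound = math.prod(shape)
--     yield [0] * rnk
--     for idx in range(1, bound):
--         c = []
--         for s in reversed(shape):
--             idx, r = divmod(idx, s)
--             c = [r] + c
--         yield c
-- ===== Notes on version B (the rewrite author's own statement) =====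
-- stated objective: alternative
-- what changed: Replaces A's stateful odometer (a running coordinate vector incremented with a carry while-loop) by a stateless per-index mixed-radix decomposition: each coordinate vector is reconstructed independently from its flat index with divmod over the axes right-to-left.
import Mathlib
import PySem

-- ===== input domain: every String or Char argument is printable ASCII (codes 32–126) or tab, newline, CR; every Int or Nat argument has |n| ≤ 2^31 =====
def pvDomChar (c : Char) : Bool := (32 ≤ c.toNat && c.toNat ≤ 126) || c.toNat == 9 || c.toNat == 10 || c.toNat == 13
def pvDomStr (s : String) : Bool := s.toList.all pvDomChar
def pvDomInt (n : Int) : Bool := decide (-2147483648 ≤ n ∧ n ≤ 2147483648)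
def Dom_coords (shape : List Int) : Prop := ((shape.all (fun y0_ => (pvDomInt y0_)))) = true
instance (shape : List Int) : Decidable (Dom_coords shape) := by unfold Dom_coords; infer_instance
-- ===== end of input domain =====

-- B replaces A's stateful odometer (running vector + carry while-loop) by a stateless
-- per-index mixed-radix divmod decomposition (objective: alternative; return value only —
-- both Pythons are generators, compared as the list of yielded vectors).

-- ===== PORT A =====
-- the while-loop 'while axis>0 and coords[axis]==shape[axis]+offsets[axis]: …; axis-=1'
-- (all list indices are in range whenever the loop runs, so getD/set are exact here)
def carryA (shape offsets : List Int) : Nat → List Int → List Int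
  | 0, c => c
  | axis+1, c =>
      if c.getD (axis+1) 0 = shape.getD (axis+1) 0 + offsets.getD (axis+1) 0 then
        carryA shape offsets axis
          (((c.set (axis+1) 0)).set axis ((c.set (axis+1) 0).getD axis 0 + 1))
      else c

def coords (shape : List Int) : List (List Int) :=
  let rnk := shape.length
  let bound := shape.prod          -- math.prod(shape)
  let offsets := List.replicate rnk (0 : Int)
  let c0 := List.replicate rnk (0 : Int)
  let st := (PySem.List.pyRange 1 bound 1).foldl
    (fun (st : List (List Int) × List Int) _idx =>
      let c1 := st.2.set (rnk - 1) (st.2.getD (rnk - 1) 0 + 1)   -- coords[rnk-1] += 1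
      let c2 := carryA shape offsets (rnk - 1) c1
      (st.1 ++ [c2], c2))
    ([c0], c0)                      -- the unconditional first yield
  st.1

-- ===== PORT B =====
-- 'for s in reversed(shape): idx, r = divmod(idx, s); c = [r] + c'
-- (divmod's divisor is never 0 when the loop runs; floordiv/mod are exact for s ≠ 0)
def coords_alt (shape : List Int) : List (List Int) :=
  let rnk := shape.length
  let bound := shape.prod          -- math.prod(shape)
  List.replicate rnk (0 : Int) ::
    (PySem.List.pyRange 1 bound 1).map (fun idx =>
      (shape.reverse.foldl
        (fun (st : Int × List Int) s =>
          (PySem.Int.floordiv st.1 s, PySem.Int.mod st.1 s :: st.2))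
        (idx, ([] : List Int))).2)

-- ===== PRECONDITION & SPEC =====
-- Pre_ excludes shapes that contain a non-positive dimension yet still have product ≥ 2
-- (an even number of negative entries): these are not meaningful shapes, A's carry
-- condition never fires on the non-positive axes and its output there is an accident of
-- the odometer loop; on every other shape (all dimensions positive, or product ≤ 1,
-- where both programs yield the single zero vector) A and B agree.
def Pre_coords (shape : List Int) : Prop := (∀ x ∈ shape, 0 < x) ∨ shape.prod ≤ 1
instance (shape : List Int) : Decidable (Pre_coords shape) := by unfold Pre_coords; infer_instance
def pvWitness_coords : List Int := [2, 3]

def Spec_coords (shape : List Int) (out : List (List Int)) : Prop := out = coords_alt shape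
instance (shape : List Int) (out : List (List Int)) : Decidable (Spec_coords shape out) := by unfold Spec_coords; infer_instance

-- ===== CLAIM (what is proved, stated in full; the proofs are below) =====
def Claim_equal_coords : Prop := ∀ (shape : List Int), Dom_coords shape → Pre_coords shape → Spec_coords shape (coords shape)

-- ===== LEMMAS AND PROOFS =====

-- digits of k in the mixed radix given by the REVERSED shape (last axis first)
def digitsR : List Int → Int → List Int
  | [], _ => []
  | s :: tl, k => PySem.Int.mod k s :: digitsR tl (PySem.Int.floordiv k s)

-- the odometer increment, on REVERSED shape/coords
def incR : List Int → List Int → List Int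
  | s :: sr, c :: cr => if cr ≠ [] ∧ c + 1 = s then 0 :: incR sr cr else (c + 1) :: cr
  | _, c => c

theorem digitsR_length (sr : List Int) (k : Int) : (digitsR sr k).length = sr.length := by
  induction sr generalizing k with
  | nil => rfl
  | cons s tl ih => simp [digitsR, ih]

theorem digitsR_zero (sr : List Int) (h : ∀ x ∈ sr, 0 < x) :
    digitsR sr 0 = List.replicate sr.length 0 := by
  induction sr with
  | nil => rfl
  | cons s tl ih =>
      have hs : 0 < s := h s (by simp)
      simp [digitsR, List.replicate_succ, PySem.Int.mod, PySem.Int.floordiv,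
        ih (fun x hx => h x (by simp [hx]))]

-- B's inner fold computes the reversed digit list
theorem foldB (sr : List Int) (k : Int) (acc : List Int) :
    (sr.foldl (fun (st : Int × List Int) s =>
        (PySem.Int.floordiv st.1 s, PySem.Int.mod st.1 s :: st.2)) (k, acc))
      = (sr.foldl (fun q s => PySem.Int.floordiv q s) k, (digitsR sr k).reverse ++ acc) := by
  induction sr generalizing k acc with
  | nil => rfl
  | cons s tl ih => simp [digitsR, List.foldl_cons, ih]

-- odometer increment = +1 on the flat index
theorem incR_digitsR (sr : List Int) (h : ∀ x ∈ sr, 0 < x) :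
    ∀ k : Int, 0 ≤ k → k + 1 < sr.prod → incR sr (digitsR sr k) = digitsR sr (k + 1) := by
  induction sr with
  | nil => intro k hk hb; simp at hb; omega
  | cons s tl ih =>
      intro k hk hb
      have hs : 0 < s := h s (by simp)
      have htl : ∀ x ∈ tl, 0 < x := fun x hx => h x (by simp [hx])
      have hfd : PySem.Int.floordiv k s = k / s := PySem.Int.floordiv_eq_ediv_of_pos hs
      have hmd : PySem.Int.mod k s = k % s := PySem.Int.mod_eq_emod_of_pos hs
      have hfd1 : PySem.Int.floordiv (k+1) s = (k+1) / s := PySem.Int.floordiv_eq_ediv_of_pos hs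
      have hmd1 : PySem.Int.mod (k+1) s = (k+1) % s := PySem.Int.mod_eq_emod_of_pos hs
      have hr0 : 0 ≤ k % s := Int.emod_nonneg k (by omega)
      have hrs : k % s < s := Int.emod_lt_of_pos k hs
      have hqr : s * (k / s) + k % s = k := Int.ediv_add_emod k s
      rcases eq_or_ne tl [] with htl0 | htl0
      · subst htl0
        simp only [List.prod_cons, List.prod_nil, mul_one] at hb
        have h1 : k % s = k := Int.emod_eq_of_lt hk (by omega)
        have h2 : (k+1) % s = k+1 := Int.emod_eq_of_lt (by omega) (by omega)
        simp [digitsR, incR, hmd, hmd1, h1, h2]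
      · have hne : digitsR tl (PySem.Int.floordiv k s) ≠ [] := by
          intro hcon
          have := digitsR_length tl (PySem.Int.floordiv k s)
          rw [hcon] at this
          exact htl0 (List.eq_nil_of_length_eq_zero this.symm)
        by_cases hcar : k % s + 1 = s
        · -- carry: (k+1) = s * (k/s + 1)
          have hk1 : k + 1 = s * (k / s + 1) := by rw [mul_add, mul_one]; omega
          have hq1 : (k+1) / s = k / s + 1 := by
            rw [hk1, Int.mul_ediv_cancel_left _ (by omega)]
          have hm1 : (k+1) % s = 0 := by rw [hk1]; exact Int.mul_emod_right s _
          have hqn : 0 ≤ k / s := Int.ediv_nonneg hk (by omega)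
          have hqb : k / s + 1 + 1 ≤ tl.prod := by
            have hb' : k + 1 < s * tl.prod := by
              simpa [List.prod_cons] using hb
            nlinarith [hb', hk1]
          have hih := ih htl (k / s) hqn (by omega)
          simp only [digitsR, incR, hmd, hmd1, hfd, hfd1, hq1, hm1]
          rw [if_pos ⟨by simpa [hfd] using hne, by omega⟩]
          exact congrArg (List.cons 0) (by simpa [hfd] using hih)
        · -- no carry
          have hq1 : (k+1) / s = k / s := by
            have : k + 1 = (k % s + 1) + s * (k / s) := by omega
            rw [this, Int.add_mul_ediv_left _ _ (by omega : s ≠ 0),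
              Int.ediv_eq_zero_of_lt (by omega) (by omega)]
            omega
          have hm1 : (k+1) % s = k % s + 1 := by
            have : k + 1 = (k % s + 1) + s * (k / s) := by omega
            rw [this, Int.add_mul_emod_self_left,
              Int.emod_eq_of_lt (by omega) (by omega)]
          simp only [digitsR, incR, hmd, hmd1, hfd, hfd1, hq1, hm1]
          rw [if_neg (by intro hc; exact hcar (by omega))]

theorem getD_last (xs : List Int) (y d : Int) : (xs ++ [y]).getD xs.length d = y := by simp

theorem set_last (xs : List Int) (y v : Int) : (xs ++ [y]).set xs.length v = xs ++ [v] := by simp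

theorem replicate_getD (m i : Nat) : (List.replicate m (0:Int)).getD i 0 = 0 := by
  simp [List.getD]

-- the carry loop only touches the first (axis+1) slots
theorem carry_append (axis : Nat) : ∀ (s t d e : List Int) (m : Nat),
    axis < d.length → d.length = s.length →
    carryA (s ++ t) (List.replicate m 0) axis (d ++ e)
      = carryA s (List.replicate m 0) axis d ++ e := by
  induction axis with
  | zero => intro s t d e m _ _; simp [carryA]
  | succ ax ih =>
      intro s t d e m hlt hlen
      have hgd : (d ++ e).getD (ax+1) 0 = d.getD (ax+1) 0 := List.getD_append _ _ _ _ hlt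
      have hgs : (s ++ t).getD (ax+1) 0 = s.getD (ax+1) 0 :=
        List.getD_append _ _ _ _ (hlen ▸ hlt)
      simp only [carryA, hgd, hgs, replicate_getD]
      by_cases hc : d.getD (ax+1) 0 = s.getD (ax+1) 0 + 0
      · rw [if_pos hc, if_pos hc]
        have hset : (d ++ e).set (ax+1) 0 = d.set (ax+1) 0 ++ e := List.set_append_left _ _ hlt
        rw [hset]
        have hax : ax < (d.set (ax+1) 0).length := by simp; omega
        rw [List.getD_append _ _ _ _ hax, List.set_append_left _ _ hax]
        exact ih s t _ e m (by simp; omega) (by simpa using hlen)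
      · rw [if_neg hc, if_neg hc]

-- one full step of A (increment last + carry) is incR on the reversed lists
theorem bridge : ∀ (n : Nat) (s' c' : List Int) (a b : Int) (m : Nat),
    s'.length = n → c'.length = n →
    carryA (s' ++ [a]) (List.replicate m 0) s'.length
        ((c' ++ [b]).set s'.length ((c' ++ [b]).getD s'.length 0 + 1))
      = (incR (a :: s'.reverse) (b :: c'.reverse)).reverse := by
  intro n
  induction n with
  | zero =>
      intro s' c' a b m hs hc
      rw [List.length_eq_zero_iff] at hs hc
      subst hs; subst hc
      simp [carryA, incR, List.getD]
  | succ k ih =>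
      intro s' c' a b m hs hc
      rcases List.eq_nil_or_concat s' with rfl | ⟨s'', a', rfl⟩
      · simp at hs
      rcases List.eq_nil_or_concat c' with rfl | ⟨c'', b', rfl⟩
      · simp at hc
      simp only [List.concat_eq_append] at *
      have hs'' : s''.length = k := by simpa using hs
      have hc'' : c''.length = k := by simpa using hc
      have hlen : (s'' ++ [a']).length = k + 1 := hs
      have hclen : (c'' ++ [b']).length = k + 1 := hc
      rw [show ((s'' ++ [a']) : List Int).length = (c'' ++ [b']).length from by rw [hlen, hclen]]
      rw [getD_last, set_last]
      rw [show ((c'' ++ [b']) : List Int).length = k + 1 from hclen]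
      simp only [carryA, replicate_getD]
      have hgd1 : ((c'' ++ [b']) ++ [b+1]).getD (k+1) 0 = b + 1 := by
        rw [show k + 1 = ((c'' ++ [b']) : List Int).length from hclen.symm, getD_last]
      have hgs1 : ((s'' ++ [a']) ++ [a]).getD (k+1) 0 = a := by
        rw [show k + 1 = ((s'' ++ [a']) : List Int).length from hlen.symm, getD_last]
      rw [hgd1, hgs1]
      by_cases hab : b + 1 = a + 0
      · rw [if_pos hab]
        have hset0 : ((c'' ++ [b']) ++ [b+1]).set (k+1) 0 = (c'' ++ [b']) ++ [0] := by
          rw [show k + 1 = ((c'' ++ [b']) : List Int).length from hclen.symm, set_last]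
        rw [hset0]
        have hk : k < ((c'' ++ [b']) : List Int).length := by rw [hclen]; omega
        rw [List.getD_append _ _ _ _ hk, List.set_append_left _ _ hk]
        rw [carry_append k (s'' ++ [a']) [a] _ [0] m (by simp; omega) (by rw [hlen]; simp; omega)]
        have hgk : ((c'' ++ [b']) : List Int).getD k 0 = b' := by
          rw [show k = c''.length from hc''.symm, getD_last]
        have := ih s'' c'' a' b' m hs'' hc''
        rw [show k = s''.length from hs''.symm] at *
        rw [show ((c'' ++ [b']) : List Int).getD s''.length 0 + 1
              = (c'' ++ [b']).getD s''.length 0 + 1 from rfl] at this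
        rw [this]
        have hcr : ((c'' ++ [b']) : List Int).reverse = b' :: c''.reverse := by simp
        have hsr : ((s'' ++ [a']) : List Int).reverse = a' :: s''.reverse := by simp
        rw [show (incR (a :: ((s'' ++ [a']) : List Int).reverse)
                (b :: ((c'' ++ [b']) : List Int).reverse))
              = 0 :: incR ((s'' ++ [a']) : List Int).reverse ((c'' ++ [b']) : List Int).reverse
            from by
          rw [hcr]
          simp [incR, hab]]
        rw [hcr, hsr]
        simp
      · rw [if_neg hab]
        have hcr : ((c'' ++ [b']) : List Int).reverse = b' :: c''.reverse := by simp
        rw [show (incR (a :: ((s'' ++ [a']) : List Int).reverse)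
                (b :: ((c'' ++ [b']) : List Int).reverse))
              = (b + 1) :: ((c'' ++ [b']) : List Int).reverse
            from by
          rw [hcr]
          simp only [incR]
          rw [if_neg (by simp; intro _; omega)]]
        simp

-- one loop iteration of A maps the decomposition of k to that of k+1
theorem stepA_eq (shape : List Int) (h : ∀ x ∈ shape, 0 < x) (hr : 1 ≤ shape.length)
    (k : Int) (hk : 0 ≤ k) (hb : k + 1 < shape.prod) :
    carryA shape (List.replicate shape.length 0) (shape.length - 1)
        (((digitsR shape.reverse k).reverse).set (shape.length - 1)
          (((digitsR shape.reverse k).reverse).getD (shape.length - 1) 0 + 1))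
      = (digitsR shape.reverse (k+1)).reverse := by
  rcases List.eq_nil_or_concat shape with rfl | ⟨s', a, rfl⟩
  · simp at hr
  simp only [List.concat_eq_append] at *
  have hlc : ((digitsR ((s' ++ [a]) : List Int).reverse k).reverse).length = s'.length + 1 := by
    simp [digitsR_length]
  rcases List.eq_nil_or_concat ((digitsR ((s' ++ [a]) : List Int).reverse k).reverse)
    with hnil | ⟨c', b, hcb⟩
  · rw [hnil] at hlc; simp at hlc
  simp only [List.concat_eq_append] at hcb
  have hcl : c'.length = s'.length := by
    rw [hcb] at hlc; simp at hlc; omega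
  have hax : ((s' ++ [a]) : List Int).length - 1 = s'.length := by simp
  rw [hcb, hax]
  rw [bridge s'.length s' c' a b _ rfl hcl]
  have hrev : b :: c'.reverse = digitsR ((s' ++ [a]) : List Int).reverse k := by
    have := congrArg List.reverse hcb
    simpa using this.symm
  have hsrev : a :: s'.reverse = ((s' ++ [a]) : List Int).reverse := by simp
  rw [hsrev, hrev]
  rw [incR_digitsR _ (by intro x hx; exact h x (by simp at hx ⊢; tauto)) k hk
    (by simp only [List.prod_reverse, List.prod_append, List.prod_cons, List.prod_nil] at hb ⊢
        nlinarith [hb])]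

-- A's main loop, from the state after index j-1, appends the decompositions of j..bound-1
theorem loopA (shape : List Int) (h : ∀ x ∈ shape, 0 < x) (hr : 1 ≤ shape.length) :
    ∀ (n : Nat) (j : Int), 1 ≤ j → shape.prod = j + n →
    ∀ (acc : List (List Int)) (c : List Int), c = (digitsR shape.reverse (j-1)).reverse →
    ((PySem.List.pyRange j shape.prod 1).foldl
      (fun (st : List (List Int) × List Int) _idx =>
        (st.1 ++ [carryA shape (List.replicate shape.length 0) (shape.length - 1)
            (st.2.set (shape.length - 1) (st.2.getD (shape.length - 1) 0 + 1))],
         carryA shape (List.replicate shape.length 0) (shape.length - 1)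
            (st.2.set (shape.length - 1) (st.2.getD (shape.length - 1) 0 + 1))))
      (acc, c)).1
    = acc ++ (PySem.List.pyRange j shape.prod 1).map
        (fun i => (digitsR shape.reverse i).reverse) := by
  intro n
  induction n with
  | zero =>
      intro j h1 hP acc c hc
      rw [PySem.List.pyRange_one_eq_nil (by omega)]
      simp
  | succ m ih =>
      intro j h1 hP acc c hc
      rw [PySem.List.pyRange_one_cons (by omega)]
      simp only [List.foldl_cons, List.map_cons]
      have hstep := stepA_eq shape h hr (j-1) (by omega) (by omega)
      rw [show j - 1 + 1 = j from by omega] at hstep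
      rw [hc, hstep]
      have := ih (j+1) (by omega) (by omega) (acc ++ [(digitsR shape.reverse j).reverse])
        ((digitsR shape.reverse j).reverse) (by rw [show j + 1 - 1 = j from by omega])
      rw [this, List.append_assoc]
      rfl

-- B's output, in closed form
theorem coords_alt_eq (shape : List Int) :
    coords_alt shape = List.replicate shape.length 0 ::
      (PySem.List.pyRange 1 shape.prod 1).map
        (fun i => (digitsR shape.reverse i).reverse) := by
  simp only [coords_alt]
  congr 1
  apply List.map_congr_left
  intro i _
  rw [foldB]
  simp

-- ===== VERDICT (by name: the statement is the Claim_ definition above) =====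
theorem coords_spec : Claim_equal_coords := by
  intro shape _ hpre
  unfold Spec_coords
  rw [coords_alt_eq]
  rcases hpre with hpos | hP1
  · -- all dimensions positive
    have hprod : 0 < shape.prod := List.prod_pos hpos
    rcases Nat.eq_zero_or_pos shape.length with hr0 | hr
    · rw [List.length_eq_zero_iff] at hr0
      subst hr0
      simp [coords, PySem.List.pyRange_one_eq_nil (by norm_num : (1:Int) ≤ 1)]
    · have hD0 : (List.replicate shape.length (0:Int))
          = (digitsR shape.reverse (1-1)).reverse := by
        rw [show (1:Int) - 1 = 0 from by norm_num,
          digitsR_zero _ (by intro x hx; exact hpos x (by simpa using hx))]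
        simp
      simp only [coords]
      rw [loopA shape hpos hr (shape.prod - 1).toNat 1 (by omega) (by omega)
        [List.replicate shape.length 0] (List.replicate shape.length 0) hD0]
      rfl
  · -- degenerate: product ≤ 1, the loop body never runs
    rw [PySem.List.pyRange_one_eq_nil hP1]
    simp [coords, PySem.List.pyRange_one_eq_nil hP1]
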